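-- pv_equiv track=rewrite | github.com/siakhooi/codility-pairacoder-2022 | codility/solution1.py | solution
-- ===== SOURCE A (Python) =====
-- def solution(S):
--   N = len(S)
--   dp = [None] * (N+1)
--   dp[N] = 0
--   for i in range(N-1, -1, -1):
--     dp[i] = 1 + dp[i+1]
--     for j in range(i+1, N):
--       if S[i] == S[j]:
--         dp[i] = min (dp[i], dp[j+1])
--   return dp[0]
-- ===== SOURCE B (Python) =====
-- def solution(S):
--     # O(N): per-character running minimum of dp[j+1] replaces the inner scan
--     best = {}
--     dp = 0  # dp[i+1] from the previous iteration; dp[N] = 0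
--     for c in reversed(S):
--         cur = 1 + dp
--         if c in best:
--             if best[c] < cur:
--                 cur = best[c]
--             if dp < best[c]:
--                 best[c] = dp
--         else:
--             best[c] = dp
--         dp = cur
--     return dp
-- ===== Notes on version B (the rewrite author's own statement) =====
-- stated objective: faster
-- what changed: A's O(N^2) inner rescan for later equal characters is replaced by a single right-to-left pass that keeps, in a dict, the running minimum of dp[j+1] per character (and only the scalar dp of the previous position instead of the whole dp array).
import Mathlib
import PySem

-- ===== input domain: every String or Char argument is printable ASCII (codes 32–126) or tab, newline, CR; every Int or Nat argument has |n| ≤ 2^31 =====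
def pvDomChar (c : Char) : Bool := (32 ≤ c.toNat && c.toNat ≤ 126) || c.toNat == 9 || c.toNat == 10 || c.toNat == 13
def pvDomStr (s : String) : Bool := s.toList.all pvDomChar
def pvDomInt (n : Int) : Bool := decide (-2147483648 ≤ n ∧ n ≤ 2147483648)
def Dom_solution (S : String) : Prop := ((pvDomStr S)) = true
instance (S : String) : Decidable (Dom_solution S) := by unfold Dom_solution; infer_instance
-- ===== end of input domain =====

-- B replaces A's O(N^2) inner rescan by a per-character running minimum kept in a dict (O(N)).

-- ===== PORT A =====
-- inner loop 'for j in range(i+1, N): if S[i] == S[j]: dp[i] = min(dp[i], dp[j+1])'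
-- (all indices are nonnegative and in range in A, so Nat indexing with getD is exact)
def solAInner (cs : List Char) (dp : List Int) (i : Nat) : Int :=
  (List.range' (i+1) (cs.length - (i+1))).foldl
    (fun acc j => if cs.getD i ' ' = cs.getD j ' ' then min acc (dp.getD (j+1) 0) else acc)
    (1 + dp.getD (i+1) 0)

def solution (S : String) : Int :=
  let cs := S.toList
  let N := cs.length
  -- dp = [None]*(N+1); dp[N] = 0  (None cells are always written before read; 0 is the placeholder)
  let dp0 := (List.replicate (N+1) (0 : Int)).set N 0
  -- for i in range(N-1, -1, -1): dp[i] = …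
  let dp := ((List.range N).reverse).foldl (fun d i => d.set i (solAInner cs d i)) dp0
  dp.getD 0 0

-- ===== PORT B =====
-- one step of B's loop body for character c, state = (best, dp)
def solBStep (st : PySem.Dict Char Int × Int) (c : Char) : PySem.Dict Char Int × Int :=
  match st.1.get? c with
  | some m =>
      (if st.2 < m then st.1.insert c st.2 else st.1,
       if m < 1 + st.2 then m else 1 + st.2)
  | none => (st.1.insert c st.2, 1 + st.2)

def solution_alt (S : String) : Int :=
  (S.toList.reverse.foldl solBStep (PySem.Dict.mk [], 0)).2

-- ===== PRECONDITION & SPEC =====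
def Spec_solution (S : String) (out : Int) : Prop := out = solution_alt S
instance (S : String) (out : Int) : Decidable (Spec_solution S out) := by unfold Spec_solution; infer_instance

-- ===== CLAIM (what is proved, stated in full; the proofs are below) =====
def Claim_equal_solution : Prop := ∀ (S : String), Dom_solution S → Spec_solution S (solution S)

-- ===== LEMMAS AND PROOFS =====

-- the list [dp 0, dp 1, …, dp N] of A's recurrence, computed structurally on the suffix
def dps : List Char → List Int
  | [] => [0]
  | c :: rest =>
      let tv := dps rest
      ((rest.zip tv.tail).foldl (fun acc p => if c = p.1 then min acc p.2 else acc)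
        (1 + tv.headD 0)) :: tv

def fdp (l : List Char) : Int := (dps l).headD 0

-- the running per-character minimum B's dict holds after processing suffix l
def bmin (c : Char) : List Char → Option Int
  | [] => none
  | x :: xs =>
      if x = c then
        some (match bmin c xs with
              | none => fdp xs
              | some m => if fdp xs < m then fdp xs else m)
      else bmin c xs

theorem dps_length (l : List Char) : (dps l).length = l.length + 1 := by
  induction l with
  | nil => rfl
  | cons x xs ih => simp [dps, ih]

theorem dps_eq_head_tail (l : List Char) : dps l = fdp l :: (dps l).tail := by
  cases l <;> rfl

theorem dps_cons (c : Char) (rest : List Char) :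
    dps (c :: rest) =
      ((rest.zip (dps rest).tail).foldl (fun acc p => if c = p.1 then min acc p.2 else acc)
        (1 + fdp rest)) :: dps rest := rfl

-- the zip-fold over the suffix equals the option-min bmin folded into the accumulator
theorem zipfold_eq_bmin (c : Char) :
    ∀ (l : List Char) (a : Int),
      (l.zip (dps l).tail).foldl (fun acc p => if c = p.1 then min acc p.2 else acc) a
        = (match bmin c l with | none => a | some m => min a m) := by
  intro l
  induction l with
  | nil => intro a; simp [bmin]
  | cons x xs ih =>
      intro a
      have htl : (dps (x :: xs)).tail = dps xs := by rw [dps_cons, List.tail_cons]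
      rw [htl, dps_eq_head_tail xs]
      simp only [List.zip_cons_cons, List.foldl_cons]
      rw [ih]
      by_cases hxc : x = c
      · subst hxc
        simp only [bmin]
        cases hb : bmin x xs with
        | none => simp
        | some m =>
            have hm : (if fdp xs < m then fdp xs else m) = min (fdp xs) m := by
              rw [min_def]; split_ifs <;> omega
            simp [hm, min_assoc]
      · have hcx : ¬ (c = x) := fun h => hxc h.symm
        simp only [bmin, if_neg hxc, if_neg hcx]

-- generic: a fold over range' s n reading two lists at offset j - s equals the fold over their zip
theorem foldl_range'_eq_zip (c : Char) :
    ∀ (xs : List Char) (ys : List Int) (s : Nat) (f : Int → Nat → Int) (a : Int),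
      ys.length = xs.length →
      (∀ k, k < xs.length → ∀ acc,
          f acc (s + k) = (if c = xs.getD k ' ' then min acc (ys.getD k 0) else acc)) →
      (List.range' s xs.length).foldl f a
        = (xs.zip ys).foldl (fun acc p => if c = p.1 then min acc p.2 else acc) a := by
  intro xs
  induction xs with
  | nil => intro ys s f a _ _; simp
  | cons x xs' ih =>
      intro ys s f a hlen hf
      cases ys with
      | nil => simp at hlen
      | cons y ys' =>
          simp only [List.length_cons]
          rw [List.range'_succ]
          simp only [List.zip_cons_cons, List.foldl_cons]
          have h0 := hf 0 (by simp) a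
          simp at h0
          rw [h0]
          apply ih ys' (s+1) f _ (by simpa using hlen)
          intro k hk acc
          have := hf (k+1) (by simpa using Nat.succ_lt_succ hk) acc
          simpa [Nat.add_comm, Nat.add_assoc, Nat.add_left_comm] using this

theorem getD_zero_eq_headD (l : List Int) (d : Int) : l.getD 0 d = l.headD d := by
  cases l <;> rfl

-- the value A's inner loop computes, given that dp already holds the final suffix values
theorem solAInner_eq (cs : List Char) (i : Nat) (hlt : i < cs.length) :
    solAInner cs (List.replicate (i+1) 0 ++ dps (cs.drop (i+1))) i
      = fdp (cs.drop i) := by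
  have hdrop : cs.drop i = cs[i] :: cs.drop (i+1) := List.drop_eq_getElem_cons hlt
  set rest := cs.drop (i+1) with hrest
  set T := dps rest with hT
  have hTlen : T.length = rest.length + 1 := dps_length rest
  have hrlen : rest.length = cs.length - (i+1) := by
    rw [hrest, List.length_drop]
  have hgetTD : ∀ (k : Nat), (List.replicate (i+1) (0:Int) ++ T).getD (i+1+k) 0 = T.getD k 0 := by
    intro k
    rw [List.getD_eq_getElem?_getD, List.getD_eq_getElem?_getD,
        List.getElem?_append_right (by simp)]
    simp
  have hinit : (List.replicate (i+1) (0:Int) ++ T).getD (i+1) 0 = T.headD 0 := by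
    have h0 := hgetTD 0
    rw [Nat.add_zero] at h0
    rw [h0, getD_zero_eq_headD]
  unfold fdp
  rw [hdrop, dps_cons]
  simp only [List.headD_cons]
  unfold solAInner
  rw [hinit, ← hrlen]
  apply foldl_range'_eq_zip cs[i] rest T.tail (i+1)
  · simp [hTlen, hrlen]
  · intro k hk acc
    have h1 : cs.getD i ' ' = cs[i] := List.getD_eq_getElem cs ' ' hlt
    have h2 : cs.getD (i+1+k) ' ' = rest.getD k ' ' := by
      rw [List.getD_eq_getElem?_getD, List.getD_eq_getElem?_getD, hrest,
          List.getElem?_drop]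
    have h3 : (List.replicate (i+1) (0:Int) ++ T).getD (i+1+k+1) 0 = T.tail.getD k 0 := by
      have := hgetTD (k+1)
      rw [show i+1+(k+1) = i+1+k+1 by omega] at this
      rw [this, List.getD_eq_getElem?_getD, List.getD_eq_getElem?_getD, List.getElem?_tail]
    rw [h1, h2, h3]

theorem A_fold (cs : List Char) :
    ∀ (k i : Nat), i + k = cs.length →
      ((List.range' i k).reverse).foldl (fun d j => d.set j (solAInner cs d j))
          ((List.replicate (cs.length+1) (0:Int)).set cs.length 0)
        = List.replicate i 0 ++ dps (cs.drop i) := by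
  intro k
  induction k with
  | zero =>
      intro i hi
      have hin : i = cs.length := by omega
      subst hin
      rw [List.drop_length]
      simp only [List.range'_zero, List.reverse_nil, List.foldl_nil]
      rw [List.replicate_succ']
      simp
      rfl
  | succ k ih =>
      intro i hi
      rw [List.range'_succ, List.reverse_cons, List.foldl_append]
      rw [ih (i+1) (by omega)]
      simp only [List.foldl_cons, List.foldl_nil]
      rw [solAInner_eq cs i (by omega)]
      rw [List.replicate_succ', List.append_assoc]
      simp
      rw [dps_eq_head_tail (cs.drop i), List.drop_eq_getElem_cons (show i < cs.length by omega), dps_cons]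
      rfl

theorem solution_eq_fdp (S : String) : solution S = fdp S.toList := by
  rw [show solution S = (((List.range S.toList.length).reverse).foldl
        (fun d i => d.set i (solAInner S.toList d i))
        ((List.replicate (S.toList.length+1) (0:Int)).set S.toList.length 0)).getD 0 0 from rfl]
  rw [List.range_eq_range']
  rw [A_fold S.toList S.toList.length 0 (by omega)]
  rw [List.replicate_zero, List.nil_append, getD_zero_eq_headD, List.drop_zero]
  rfl

theorem B_inv : ∀ (l : List Char),
    (l.reverse.foldl solBStep (PySem.Dict.mk [], 0)).2 = fdp l
  ∧ ∀ c, (l.reverse.foldl solBStep (PySem.Dict.mk [], 0)).1.get? c = bmin c l := by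
  intro l
  induction l with
  | nil =>
      refine ⟨rfl, fun c => ?_⟩
      simp [bmin]
      rfl
  | cons x xs ih =>
      obtain ⟨ihd, ihb⟩ := ih
      rw [List.reverse_cons, List.foldl_append]
      simp only [List.foldl_cons, List.foldl_nil]
      set st := xs.reverse.foldl solBStep (PySem.Dict.mk [], 0) with hst
      have hfdp : fdp (x :: xs)
          = (match bmin x xs with | none => 1 + fdp xs | some m => min (1 + fdp xs) m) := by
        unfold fdp
        rw [dps_cons]
        simp only [List.headD_cons]
        rw [zipfold_eq_bmin]
        rfl
      unfold solBStep
      rw [ihb x]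
      cases hb : bmin x xs with
      | none =>
          simp only []
          constructor
          · rw [ihd, hfdp, hb]
          · intro c
            rw [PySem.Dict.get?_insert]
            by_cases hcx : c = x
            · subst hcx
              simp [bmin, hb, ihd]
            · rw [if_neg hcx, ihb c]
              simp only [bmin, if_neg (Ne.symm hcx)]
      | some m =>
          simp only []
          constructor
          · rw [ihd, hfdp, hb]
            show (if m < 1 + fdp xs then m else 1 + fdp xs) = min (1 + fdp xs) m
            rw [min_def]
            split_ifs <;> omega
          · intro c
            by_cases hcx : c = x
            · subst hcx
              rw [ihd]
              by_cases h1 : fdp xs < m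
              · rw [if_pos h1, PySem.Dict.get?_insert_self]
                simp [bmin, hb, h1]
              · rw [if_neg h1, ihb c, hb]
                simp [bmin, hb, h1]
            · have hbm : bmin c (x :: xs) = bmin c xs := by
                simp only [bmin, if_neg (Ne.symm hcx)]
              rw [hbm]
              split_ifs with h1
              · rw [PySem.Dict.get?_insert_of_ne _ _ hcx, ihb c]
              · exact ihb c

theorem solution_alt_eq_fdp (S : String) : solution_alt S = fdp S.toList := by
  unfold solution_alt
  exact (B_inv S.toList).1

-- ===== VERDICT (by name: the statement is the Claim_ definition above) =====
theorem solution_spec : Claim_equal_solution := by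
  intro S _
  unfold Spec_solution
  rw [solution_eq_fdp, solution_alt_eq_fdp]
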